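-- pv_equiv track=rewrite | github.com/ahaocd/SmartSisi | evoliu/guild_supervisor_agent.py | _normalize_pending_queue
-- ===== SOURCE A (Python) =====
-- from typing import Dict, List, Any, Optional, Tuple, Callable
--
-- def _normalize_pending_queue(queue: List[Any]) -> List[Tuple[str, str]]:
--     """标准化队列结构并按task_id去重（保留最后一次描述）。"""
--     normalized: List[Tuple[str, str]] = []
--     latest: Dict[str, str] = {}
--     order: List[str] = []
--
--     for item in queue or []:
--         task_id = ""
--         description = ""
--         if isinstance(item, (list, tuple)) and len(item) >= 2:
--             task_id = str(item[0] or "").strip()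
--             description = str(item[1] or "").strip()
--         elif isinstance(item, dict):
--             task_id = str(item.get("task_id") or "").strip()
--             description = str(item.get("description") or "").strip()
--
--         if not task_id:
--             continue
--         if task_id not in latest:
--             order.append(task_id)
--         latest[task_id] = description
--
--     for task_id in order:
--         normalized.append((task_id, latest[task_id]))
--     return normalized
-- ===== SOURCE B (Python) =====
-- def _normalize_pending_queue(queue):
--     """Staged rewrite: (1) normalize into a flat pair list, (2) reverse scan
--     with first-wins to capture each id's final description, (3) forward scan
--     emitting each id at its first occurrence."""
--     pairs = []
--     for item in queue or []:
--         task_id = ""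
--         description = ""
--         if isinstance(item, (list, tuple)) and len(item) >= 2:
--             task_id = str(item[0] or "").strip()
--             description = str(item[1] or "").strip()
--         elif isinstance(item, dict):
--             task_id = str(item.get("task_id") or "").strip()
--             description = str(item.get("description") or "").strip()
--         if task_id:
--             pairs.append((task_id, description))
--     last = {}
--     for task_id, description in reversed(pairs):
--         if task_id not in last:
--             last[task_id] = description
--     seen = set()
--     result = []
--     for task_id, _ in pairs:
--         if task_id not in seen:
--             seen.add(task_id)
--             result.append((task_id, last[task_id]))
--     return result
-- ===== Notes on version B (the rewrite author's own statement) =====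
-- stated objective: alternative
-- what changed: Replaces A's single forward pass maintaining an overwrite-dict plus a parallel first-seen order list with three staged scans: normalize into a flat pair list, a reverse scan with first-wins capturing each id's final description, then a forward scan with a seen-set emitting each id at its first occurrence.
import Mathlib
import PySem

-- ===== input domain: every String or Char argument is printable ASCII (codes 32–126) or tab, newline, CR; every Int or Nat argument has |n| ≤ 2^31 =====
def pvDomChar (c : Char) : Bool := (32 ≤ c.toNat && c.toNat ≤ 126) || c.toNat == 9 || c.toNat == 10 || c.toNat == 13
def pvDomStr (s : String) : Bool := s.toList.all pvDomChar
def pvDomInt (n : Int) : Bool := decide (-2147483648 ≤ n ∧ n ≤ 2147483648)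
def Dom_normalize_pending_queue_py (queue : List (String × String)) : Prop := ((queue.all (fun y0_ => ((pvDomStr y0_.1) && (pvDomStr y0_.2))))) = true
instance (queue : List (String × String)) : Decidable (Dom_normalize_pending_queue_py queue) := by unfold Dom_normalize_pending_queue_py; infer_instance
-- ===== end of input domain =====

-- B is an alternative decomposition: instead of A's forward overwrite-dict plus
-- a parallel first-seen order list, B stages three scans (normalize; reverse
-- first-wins for the final description; forward first-occurrence emit).
-- Under the type convention every item is a (str, str) pair, so A's
-- `isinstance(item, (list, tuple)) and len(item) >= 2` branch always fires and
-- `str(x or "")` is the identity on the str x (`"".strip()` = "" either way).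

-- ===== PORT A =====
-- loop body of A: state = (latest dict, first-seen order list)
def pvStepA (st : PySem.Dict String String × List String) (item : String × String) :
    PySem.Dict String String × List String :=
  let task_id := PySem.Str.strip item.1
  let description := PySem.Str.strip item.2
  if task_id = "" then st
  else
    let order := if st.1.contains task_id then st.2 else st.2 ++ [task_id]
    (st.1.insert task_id description, order)

def normalize_pending_queue_py (queue : List (String × String)) : List (String × String) :=
  let st := queue.foldl pvStepA (PySem.Dict.empty, [])
  -- final rebuild loop: latest[task_id] always succeeds; ported as getD with dummy default
  st.2.foldl (fun normalized task_id => normalized ++ [(task_id, st.1.getD task_id "")]) []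

-- ===== PORT B =====
-- pass 1 of B: normalize/strip and keep the non-empty ids, in order
def pvNorm (queue : List (String × String)) : List (String × String) :=
  queue.foldl (fun pairs item =>
    let task_id := PySem.Str.strip item.1
    if task_id = "" then pairs else pairs ++ [(task_id, PySem.Str.strip item.2)]) []

-- pass 2 of B: first-wins insertion (loop body of `if task_id not in last`)
def pvLastStep (last : PySem.Dict String String) (p : String × String) :
    PySem.Dict String String :=
  if last.contains p.1 then last else last.insert p.1 p.2

-- pass 3 of B: loop body over pairs with the seen set; `last[task_id]` always
-- succeeds (every id of pairs is in last), ported as getD with dummy default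
def pvEmitStep (last : PySem.Dict String String)
    (st : PySem.Set String × List (String × String)) (p : String × String) :
    PySem.Set String × List (String × String) :=
  if st.1.contains p.1 then st
  else (PySem.Set.add st.1 p.1, st.2 ++ [(p.1, last.getD p.1 "")])

def normalize_pending_queue_py_alt (queue : List (String × String)) : List (String × String) :=
  let pairs := pvNorm queue
  let last := pairs.reverse.foldl pvLastStep PySem.Dict.empty
  (pairs.foldl (pvEmitStep last) (PySem.Set.empty, [])).2

-- ===== PRECONDITION & SPEC =====
def Spec_normalize_pending_queue_py (queue : List (String × String)) (out : List (String × String)) : Prop := out = normalize_pending_queue_py_alt queue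
instance (queue : List (String × String)) (out : List (String × String)) : Decidable (Spec_normalize_pending_queue_py queue out) := by unfold Spec_normalize_pending_queue_py; infer_instance

-- ===== CLAIM (what is proved, stated in full; the proofs are below) =====
def Claim_equal_normalize_pending_queue_py : Prop := ∀ (queue : List (String × String)), Dom_normalize_pending_queue_py queue → Spec_normalize_pending_queue_py queue (normalize_pending_queue_py queue)

-- ===== LEMMAS AND PROOFS =====

-- recursive form of B's pass 1
def pvNormRec : List (String × String) → List (String × String)
  | [] => []
  | item :: rest =>
      if PySem.Str.strip item.1 = "" then pvNormRec rest
      else (PySem.Str.strip item.1, PySem.Str.strip item.2) :: pvNormRec rest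

theorem pvNorm_eq_rec_aux (q : List (String × String)) (acc : List (String × String)) :
    q.foldl (fun pairs item =>
      let task_id := PySem.Str.strip item.1
      if task_id = "" then pairs else pairs ++ [(task_id, PySem.Str.strip item.2)]) acc
    = acc ++ pvNormRec q := by
  induction q generalizing acc with
  | nil => simp [pvNormRec]
  | cons p rest ih =>
    simp only [List.foldl_cons, pvNormRec]
    by_cases h : PySem.Str.strip p.1 = "" <;> simp [h, ih, List.append_assoc]

theorem pvNorm_eq_rec (q : List (String × String)) : pvNorm q = pvNormRec q := by
  simpa using pvNorm_eq_rec_aux q []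

-- A's loop over queue is the stripped loop over the normalized pair list
def pvStepA' (st : PySem.Dict String String × List String) (p : String × String) :
    PySem.Dict String String × List String :=
  (st.1.insert p.1 p.2, if st.1.contains p.1 then st.2 else st.2 ++ [p.1])

theorem pv_foldA_norm (q : List (String × String)) (st : PySem.Dict String String × List String) :
    q.foldl pvStepA st = (pvNormRec q).foldl pvStepA' st := by
  induction q generalizing st with
  | nil => rfl
  | cons p rest ih =>
    simp only [List.foldl_cons, pvNormRec]
    by_cases h : PySem.Str.strip p.1 = ""
    · simp only [h, pvStepA]
      exact ih st
    · simp only [if_neg h, List.foldl_cons]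
      have : pvStepA st p = pvStepA' st (PySem.Str.strip p.1, PySem.Str.strip p.2) := by
        simp [pvStepA, pvStepA', h]
      rw [this, ih]

-- invariant: A's order list is the keys of A's dict, which is the plain overwrite fold
theorem pv_inv (l : List (String × String)) (d : PySem.Dict String String)
    (hn : d.keys.Nodup) :
    l.foldl pvStepA' (d, d.keys)
      = (l.foldl (fun d p => d.insert p.1 p.2) d,
         (l.foldl (fun d p => d.insert p.1 p.2) d).keys) := by
  induction l generalizing d with
  | nil => rfl
  | cons p rest ih =>
    simp only [List.foldl_cons]
    have hord : (if d.contains p.1 then d.keys else d.keys ++ [p.1])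
        = (d.insert p.1 p.2).keys := by
      by_cases hc : d.contains p.1 = true
      · rw [PySem.Dict.keys_insert_of_contains _ _ hc]; simp [hc]
      · rw [PySem.Dict.keys_insert_of_not_contains _ _ (by simpa using hc)]; simp [hc]
    have hA : pvStepA' (d, d.keys) p
        = (d.insert p.1 p.2, (d.insert p.1 p.2).keys) := by
      simp only [pvStepA']; exact congrArg _ hord
    rw [hA]
    exact ih _ (PySem.Dict.nodup_keys_insert _ _ _ hn)

-- forward overwrite fold looks up the LAST matching pair
theorem pv_get_fwd (l : List (String × String)) (d : PySem.Dict String String) (t : String) :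
    (l.foldl (fun d p => d.insert p.1 p.2) d).get? t
      = match l.reverse.find? (fun p => p.1 == t) with
        | some p => some p.2
        | none => d.get? t := by
  induction l generalizing d with
  | nil => rfl
  | cons p rest ih =>
    simp only [List.foldl_cons, List.reverse_cons, ih, List.find?_append]
    cases h : rest.reverse.find? (fun p => p.1 == t) with
    | some q => simp
    | none =>
      by_cases ht : p.1 = t
      · subst ht; simp [PySem.Dict.get?_insert_self]
      · have hbe : (p.1 == t) = false := by simp [ht]
        simp [List.find?, hbe, PySem.Dict.get?_insert_of_ne _ _ (Ne.symm ht)]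

-- reverse first-wins fold looks up the FIRST matching pair (of the reversed list)
theorem pv_get_rev (l : List (String × String)) (d : PySem.Dict String String) (t : String) :
    (l.foldl pvLastStep d).get? t
      = match d.get? t with
        | some v => some v
        | none => (l.find? (fun p => p.1 == t)).map Prod.snd := by
  induction l generalizing d with
  | nil => cases h : d.get? t <;> simp [h]
  | cons p rest ih =>
    simp only [List.foldl_cons, pvLastStep]
    by_cases hc : d.contains p.1 = true
    · rw [if_pos hc, ih]
      cases hd : d.get? t with
      | some v => simp
      | none =>
        have hne : p.1 ≠ t := by
          intro he
          rw [PySem.Dict.contains_eq_isSome_get?, he, hd] at hc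
          simp at hc
        have hbe : (p.1 == t) = false := by simp [hne]
        simp [List.find?, hbe]
    · rw [if_neg hc, ih]
      by_cases ht : p.1 = t
      · subst ht
        have hd : d.get? p.1 = none := by
          rw [PySem.Dict.contains_eq_isSome_get?] at hc
          cases h : d.get? p.1 <;> simp [h] at hc ⊢
        simp [hd, PySem.Dict.get?_insert_self, List.find?]
      · rw [PySem.Dict.get?_insert_of_ne _ _ (Ne.symm ht)]
        have hbe : (p.1 == t) = false := by simp [ht]
        cases hd : d.get? t <;> simp [List.find?, hbe]

-- hence the two dicts agree on every lookup
theorem pv_getD_eq (l : List (String × String)) (t : String) :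
    (l.foldl (fun d p => d.insert p.1 p.2) PySem.Dict.empty).getD t ""
      = (l.reverse.foldl pvLastStep PySem.Dict.empty).getD t "" := by
  rw [PySem.Dict.getD_eq_get?_getD, PySem.Dict.getD_eq_get?_getD,
    pv_get_fwd, pv_get_rev]
  simp only [PySem.Dict.get?_empty]
  cases h : l.reverse.find? (fun p => p.1 == t) <;> simp

-- the ids B's pass 3 emits, relative to a seen set
def pvNewIds (s : PySem.Set String) : List String → List String
  | [] => []
  | t :: ts => if s.contains t then pvNewIds s ts else t :: pvNewIds (PySem.Set.add s t) ts

theorem pv_newIds_update (ids : List String) (s : PySem.Set String) :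
    PySem.Set.update s ids = s ++ pvNewIds s ids := by
  induction ids generalizing s with
  | nil => simp [PySem.Set.update_nil, pvNewIds]
  | cons t ts ih =>
    rw [PySem.Set.update_cons]
    simp only [pvNewIds]
    by_cases hc : PySem.Set.contains s t = true
    · have hm : t ∈ s := (PySem.Set.contains_iff s t).mp hc
      rw [PySem.Set.add_of_mem hm, if_pos hc, ih]
    · have hm : t ∉ s := fun h => hc ((PySem.Set.contains_iff s t).mpr h)
      rw [if_neg hc, ih, PySem.Set.add_of_not_mem hm, List.append_assoc, List.singleton_append]

theorem pv_emit (last : PySem.Dict String String) (ps : List (String × String))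
    (s : PySem.Set String) (acc : List (String × String)) :
    (ps.foldl (pvEmitStep last) (s, acc)).2
      = acc ++ (pvNewIds s (ps.map Prod.fst)).map (fun t => (t, last.getD t "")) := by
  induction ps generalizing s acc with
  | nil => simp [pvNewIds]
  | cons p rest ih =>
    simp only [List.foldl_cons, pvEmitStep, List.map_cons, pvNewIds]
    by_cases hc : PySem.Set.contains s p.1 = true
    · rw [if_pos hc, if_pos hc]; exact ih s acc
    · rw [if_neg hc, if_neg hc]
      simp only [ih, List.map_cons, List.append_assoc, List.singleton_append]

-- keys of the overwrite fold = first occurrences of the ids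
theorem pv_keysF (ps : List (String × String)) :
    (ps.foldl (fun d p => d.insert p.1 p.2) (PySem.Dict.empty : PySem.Dict String String)).keys
      = PySem.Set.ofList (ps.map Prod.fst) := by
  rw [PySem.Dict.keys_foldl_insert_key (key := Prod.fst) (f := fun _ p => p.2),
    PySem.Dict.keys_empty, PySem.Set.update_nil_left]

-- ===== VERDICT (by name: the statement is the Claim_ definition above) =====
theorem normalize_pending_queue_py_spec : Claim_equal_normalize_pending_queue_py := by
  intro queue _
  unfold Spec_normalize_pending_queue_py normalize_pending_queue_py normalize_pending_queue_py_alt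
  rw [pvNorm_eq_rec]
  set ps := pvNormRec queue with hps
  set dF := ps.foldl (fun d p => d.insert p.1 p.2) PySem.Dict.empty with hdF
  set L := ps.reverse.foldl pvLastStep PySem.Dict.empty with hL
  have hA : queue.foldl pvStepA (PySem.Dict.empty, [])
      = (dF, dF.keys) := by
    rw [pv_foldA_norm, ← hps]
    have := pv_inv ps PySem.Dict.empty PySem.Dict.nodup_keys_empty
    rw [PySem.Dict.keys_empty] at this
    exact this
  rw [hA]
  simp only
  rw [PySem.List.foldl_append_singleton_eq_map, List.nil_append,
    pv_emit, List.nil_append, pv_keysF]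
  have hids : pvNewIds PySem.Set.empty (ps.map Prod.fst)
      = PySem.Set.ofList (ps.map Prod.fst) := by
    have := pv_newIds_update (ps.map Prod.fst) PySem.Set.empty
    simpa only [PySem.Set.empty, PySem.Set.update_nil_left, List.nil_append] using this.symm
  rw [hids]
  exact List.map_congr_left (fun t _ => by rw [pv_getD_eq])
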